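-- pv_equiv track=rewrite | github.com/AlexanderNevarko/yandex_proj | app/validators.py | check_citizen_ids
-- ===== SOURCE A (Python) =====
-- def check_citizen_ids(data):
--     ids = set()
--     for citizen in data['citizens']:
--         if citizen['citizen_id'] in ids:
--             return False
--         else:
--             ids.add(citizen['citizen_id'])
--     return True
-- ===== SOURCE B (Python) =====
-- def check_citizen_ids(data):
--     ids = [citizen['citizen_id'] for citizen in data['citizens']]
--     return len(ids) == len(set(ids))
-- ===== Notes on version B (the rewrite author's own statement) =====
-- stated objective: simpler
-- what changed: B materializes the whole id list with a comprehension and decides uniqueness by one size comparison len(ids) == len(set(ids)), instead of A's guarded single pass that grows a set and early-returns on the first repeat.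
-- outside the precondition, e.g. on check_citizen_ids({'citizens': [{'citizen_id': 1}, {'citizen_id': 1}, {}]}): A returns False, B raises KeyError
import Mathlib
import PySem

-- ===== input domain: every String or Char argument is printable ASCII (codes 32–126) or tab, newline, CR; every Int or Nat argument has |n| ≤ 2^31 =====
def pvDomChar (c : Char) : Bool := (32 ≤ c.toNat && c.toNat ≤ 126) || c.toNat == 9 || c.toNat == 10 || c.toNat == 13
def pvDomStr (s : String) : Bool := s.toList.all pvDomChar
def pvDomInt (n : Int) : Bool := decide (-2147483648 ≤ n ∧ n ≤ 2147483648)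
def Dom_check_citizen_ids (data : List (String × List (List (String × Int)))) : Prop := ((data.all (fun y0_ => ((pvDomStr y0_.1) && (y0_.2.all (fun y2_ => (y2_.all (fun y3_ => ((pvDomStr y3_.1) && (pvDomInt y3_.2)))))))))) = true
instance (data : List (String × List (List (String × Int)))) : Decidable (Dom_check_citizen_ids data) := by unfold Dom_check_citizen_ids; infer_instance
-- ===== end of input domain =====

-- B replaces A's guarded single pass (grow a set, early-return on the first repeat)
-- by building the full id list and comparing its length with its set's length.

-- ===== PORT A =====
-- A's for-loop with early 'return False': structural recursion over the citizens
-- carrying the 'ids' set; 'none' from a lookup marks Python's KeyError (outside Pre_).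
def checkLoopA : List (List (String × Int)) → PySem.Set Int → Bool
  | [], _ => true
  | c :: rest, ids =>
    match List.lookup "citizen_id" c with
    | none => false
    | some id => if PySem.Set.contains ids id then false else checkLoopA rest (PySem.Set.add ids id)

def check_citizen_ids (data : List (String × List (List (String × Int)))) : Bool :=
  match List.lookup "citizens" data with
  | none => false
  | some citizens => checkLoopA citizens PySem.Set.empty

-- ===== PORT B =====
-- Source B: ids = [c['citizen_id'] for c in data['citizens']]; len(ids) == len(set(ids)).
-- A missing key yields 'none' in the list (Python's KeyError; outside Pre_).
def check_citizen_ids_alt (data : List (String × List (List (String × Int)))) : Bool :=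
  match List.lookup "citizens" data with
  | none => false
  | some citizens =>
    let ids : List (Option Int) := citizens.map (fun c => List.lookup "citizen_id" c)
    ids.length == (PySem.Set.ofList ids).length

-- ===== PRECONDITION & SPEC =====
-- Pre_ excludes inputs missing the 'citizens' key or some citizen's 'citizen_id' key:
-- there A raises KeyError, except that A may short-circuit to False on a duplicate that
-- precedes the missing key, where B's comprehension still raises (see claim cites).
def Pre_check_citizen_ids (data : List (String × List (List (String × Int)))) : Prop :=
  (List.lookup "citizens" data).isSome = true ∧
  ∀ c ∈ (List.lookup "citizens" data).getD [], (List.lookup "citizen_id" c).isSome = true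
instance (data : List (String × List (List (String × Int)))) : Decidable (Pre_check_citizen_ids data) := by unfold Pre_check_citizen_ids; infer_instance

def pvWitness_check_citizen_ids : (List (String × List (List (String × Int)))) :=
  [("citizens", [[("citizen_id", 1)], [("citizen_id", 2)]])]

def Spec_check_citizen_ids (data : List (String × List (List (String × Int)))) (out : Bool) : Prop := out = check_citizen_ids_alt data
instance (data : List (String × List (List (String × Int)))) (out : Bool) : Decidable (Spec_check_citizen_ids data out) := by unfold Spec_check_citizen_ids; infer_instance

-- ===== CLAIM (what is proved, stated in full; the proofs are below) =====
def Claim_equal_check_citizen_ids : Prop := ∀ (data : List (String × List (List (String × Int)))), Dom_check_citizen_ids data → Pre_check_citizen_ids data → Spec_check_citizen_ids data (check_citizen_ids data)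

-- ===== LEMMAS AND PROOFS =====

-- the foldl of Set.add lands inside s ++ xs (set(xs) keeps first occurrences, in order)
lemma foldl_add_sublist {α : Type} [BEq α] [LawfulBEq α] (xs : List α) (s : PySem.Set α) :
    (xs.foldl PySem.Set.add s).Sublist (s ++ xs) := by
  induction xs generalizing s with
  | nil => simp
  | cons x xs ih =>
    simp only [List.foldl_cons]
    refine (ih (PySem.Set.add s x)).trans ?_
    unfold PySem.Set.add
    split
    · exact (List.append_sublist_append_left s).mpr (List.sublist_cons_self x xs)
    · simp

-- on a Nodup list disjoint from s, foldl Set.add appends everything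
lemma foldl_add_of_nodup {α : Type} [BEq α] [LawfulBEq α] (xs : List α) (s : PySem.Set α)
    (hn : xs.Nodup) (hd : ∀ x ∈ xs, x ∉ s) : xs.foldl PySem.Set.add s = s ++ xs := by
  induction xs generalizing s with
  | nil => simp
  | cons x xs ih =>
    simp only [List.foldl_cons]
    have hx : x ∉ s := hd x (List.mem_cons_self)
    have hadd : PySem.Set.add s x = s ++ [x] := by
      unfold PySem.Set.add PySem.Set.contains
      simp [List.contains_eq_mem, hx]
    rw [hadd, ih (s ++ [x]) hn.of_cons]
    · simp
    · intro y hy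
      simp only [List.mem_append, List.mem_singleton]
      rintro (h | rfl)
      · exact hd y (List.mem_cons_of_mem _ hy) h
      · exact (List.nodup_cons.mp hn).1 hy

-- len(xs) == len(set(xs)) decides Nodup
lemma len_eq_len_ofList_iff {α : Type} [BEq α] [LawfulBEq α] [DecidableEq α] (xs : List α) :
    (xs.length == (PySem.Set.ofList xs).length) = decide xs.Nodup := by
  rcases Decidable.em xs.Nodup with h | h
  · have heq : PySem.Set.ofList xs = xs := by
      rw [PySem.Set.ofList_eq_foldl]
      simpa using foldl_add_of_nodup xs ([] : PySem.Set α) h (by simp)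
    simp [heq, h]
  · have hsub : (PySem.Set.ofList xs).Sublist xs := by
      rw [PySem.Set.ofList_eq_foldl]
      simpa [PySem.Set.empty] using foldl_add_sublist xs PySem.Set.empty
    have hne : xs.length ≠ (PySem.Set.ofList xs).length := by
      intro heq
      have hx : PySem.Set.ofList xs = xs := hsub.eq_of_length heq.symm
      exact h (hx ▸ PySem.Set.nodup_ofList xs)
    have hd : decide xs.Nodup = false := by simp [h]
    rw [hd, beq_eq_false_iff_ne]
    exact hne

-- characterization of A's loop on citizens whose 'citizen_id' lookup succeeds
lemma checkLoopA_eq (cs : List (List (String × Int))) (s : PySem.Set Int)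
    (h : ∀ c ∈ cs, (List.lookup "citizen_id" c).isSome = true) :
    checkLoopA cs s =
      decide ((cs.map (fun c => List.lookup "citizen_id" c)).Nodup ∧
              ∀ o ∈ cs.map (fun c => List.lookup "citizen_id" c),
                ∀ id : Int, o = some id → id ∉ s) := by
  induction cs generalizing s with
  | nil => simp [checkLoopA]
  | cons c rest ih =>
    obtain ⟨id, hid⟩ := Option.isSome_iff_exists.mp (h c (List.mem_cons_self))
    have hrest : ∀ c' ∈ rest, (List.lookup "citizen_id" c').isSome = true :=
      fun c' hc' => h c' (List.mem_cons_of_mem _ hc')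
    simp only [checkLoopA, hid]
    by_cases hmem : id ∈ s
    · have hc : PySem.Set.contains s id = true := by
        unfold PySem.Set.contains; simpa [List.contains_eq_mem] using hmem
      rw [hc, if_pos rfl]
      symm
      simp only [decide_eq_false_iff_not]
      rintro ⟨-, hall⟩
      exact hall (some id) (by simp [hid]) id rfl hmem
    · have hc : PySem.Set.contains s id = false := by
        unfold PySem.Set.contains; simpa [List.contains_eq_mem] using hmem
      rw [hc, if_neg (by simp)]
      rw [ih (PySem.Set.add s id) hrest]
      apply decide_eq_decide.mpr
      have hadds : ∀ j : Int, j ∈ PySem.Set.add s id ↔ j ∈ s ∨ j = id :=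
        fun j => PySem.Set.mem_add s id j
      simp only [List.map_cons, hid, List.nodup_cons, List.mem_cons, forall_eq_or_imp]
      constructor
      · rintro ⟨hnd, hall⟩
        refine ⟨⟨fun hin => ?_, hnd⟩, ⟨fun j hj => (Option.some.inj hj) ▸ hmem, ?_⟩⟩
        · exact (hall (some id) hin id rfl) ((hadds id).mpr (Or.inr rfl))
        · intro o ho j hoj hjs
          exact hall o ho j hoj ((hadds j).mpr (Or.inl hjs))
      · rintro ⟨⟨hnotin, hnd⟩, -, hall⟩
        refine ⟨hnd, ?_⟩
        intro o ho j hoj hjadd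
        rcases (hadds j).mp hjadd with hjs | rfl
        · exact hall o ho j hoj hjs
        · exact hnotin (hoj ▸ ho)

-- ===== VERDICT (by name: the statement is the Claim_ definition above) =====
theorem check_citizen_ids_spec : Claim_equal_check_citizen_ids := by
  intro data _ hpre
  obtain ⟨hcit, hids⟩ := hpre
  obtain ⟨cs, hcs⟩ := Option.isSome_iff_exists.mp hcit
  unfold Spec_check_citizen_ids check_citizen_ids check_citizen_ids_alt
  rw [hcs] at hids ⊢
  simp only [Option.getD_some] at hids
  show checkLoopA cs PySem.Set.empty =
    ((cs.map (fun c => List.lookup "citizen_id" c)).length ==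
      (PySem.Set.ofList (cs.map (fun c => List.lookup "citizen_id" c))).length)
  rw [checkLoopA_eq cs PySem.Set.empty hids, len_eq_len_ofList_iff]
  apply decide_eq_decide.mpr
  constructor
  · exact fun h => h.1
  · exact fun h => ⟨h, fun o _ j _ hjs => by simp [PySem.Set.empty] at hjs⟩
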